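-- pv_equiv track=rewrite | github.com/tommywood81/sherlock-chatbot | training/train_lora.py | mask_labels_to_assistant_only
-- ===== SOURCE A (Python) =====
-- from typing import Any, Dict, List, Optional, Tuple
--
-- def mask_labels_to_assistant_only(input_ids: List[int], labels: List[int], assistant_token_ids: List[int]) -> List[int]:
--     """
--     Mask labels so only the assistant response contributes to loss.
--     Finds the last occurrence of assistant header token sequence and un-masks
--     tokens after it, up to (but not including) the final EOT.
--     """
--     # Default: mask everything
--     masked = [-100] * len(labels)
--
--     def find_subsequence(haystack: List[int], needle: List[int]) -> int:
--         for i in range(0, len(haystack) - len(needle) + 1):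
--             if haystack[i : i + len(needle)] == needle:
--                 return i
--         return -1
--
--     start = -1
--     # Find LAST assistant header occurrence
--     search_from = 0
--     while True:
--         idx = find_subsequence(input_ids[search_from:], assistant_token_ids)
--         if idx == -1:
--             break
--         start = search_from + idx
--         search_from = start + 1
--
--     if start == -1:
--         return masked
--
--     start_labels = start + len(assistant_token_ids)
--     for i in range(start_labels, len(labels)):
--         masked[i] = labels[i]
--     return masked
-- ===== SOURCE B (Python) =====
-- def mask_labels_to_assistant_only(input_ids, labels, assistant_token_ids):
--     """Backward scan from the end: the first match found is the last occurrence,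
--     then the output is built directly as a prefix of -100s plus the label tail."""
--     n = len(input_ids)
--     m = len(assistant_token_ids)
--     start = -1
--     if m <= n:
--         i = n - m
--         while True:
--             if input_ids[i:i + m] == assistant_token_ids:
--                 start = i
--                 break
--             if i == 0:
--                 break
--             i -= 1
--     if start == -1:
--         return [-100] * len(labels)
--     cut = min(start + m, len(labels))
--     return [-100] * cut + labels[cut:]
-- ===== Notes on version B (the rewrite author's own statement) =====
-- stated objective: alternative
-- what changed: A repeatedly restarts a forward subsequence search after every match to find the last occurrence; B scans backward from the end so the first match found is the last occurrence, and builds the output directly as a -100 prefix plus the label tail instead of overwriting a prefilled list. Pre_ excludes an empty assistant_token_ids, on which A's search loop never terminates (find_subsequence of an empty needle always returns 0).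
-- outside the precondition, e.g. on mask_labels_to_assistant_only([1], [7], []): A does not finish within the time limit, B returns [-100]
import Mathlib
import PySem

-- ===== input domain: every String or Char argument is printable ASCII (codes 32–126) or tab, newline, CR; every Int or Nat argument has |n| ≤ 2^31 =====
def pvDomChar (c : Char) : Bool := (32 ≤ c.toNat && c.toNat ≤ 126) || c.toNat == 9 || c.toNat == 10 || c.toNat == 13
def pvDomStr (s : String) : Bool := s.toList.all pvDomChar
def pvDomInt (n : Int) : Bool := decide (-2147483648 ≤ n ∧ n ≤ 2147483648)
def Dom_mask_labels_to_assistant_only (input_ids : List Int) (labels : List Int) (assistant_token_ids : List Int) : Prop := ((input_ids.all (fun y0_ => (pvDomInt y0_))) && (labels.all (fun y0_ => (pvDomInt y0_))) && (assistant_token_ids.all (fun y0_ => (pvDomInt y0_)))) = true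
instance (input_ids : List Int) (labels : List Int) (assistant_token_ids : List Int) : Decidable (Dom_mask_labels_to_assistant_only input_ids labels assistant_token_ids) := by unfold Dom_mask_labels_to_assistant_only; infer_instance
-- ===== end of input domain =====

-- ===== PORT A =====
-- B changes the search: a single backward scan from the end (first match found = last
-- occurrence) instead of repeated forward searches, and builds the output directly
-- as a -100 prefix plus the label tail; objective: alternative algorithm.

-- find_subsequence: forward scan from index i (Python: for i in range(0, len-m+1))
def pvFindSubAux (hay need : List Int) (i : Nat) : Int :=
  if _h : i + need.length ≤ hay.length then
    if (hay.drop i).take need.length = need then (i : Int)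
    else pvFindSubAux hay need (i + 1)
  else -1
termination_by hay.length + 1 - i
decreasing_by omega

def pvFindSubsequence (hay need : List Int) : Int := pvFindSubAux hay need 0

-- the while-True loop of A; fuel = input_ids.length + 1 is enough within Pre_
-- (search_from strictly increases and never exceeds the length when the needle is nonempty)
def pvLoopA (ids need : List Int) (start : Int) (sf : Nat) : Nat → Int
  | 0 => start
  | fuel + 1 =>
    let idx := pvFindSubsequence (ids.drop sf) need
    if idx = -1 then start
    else pvLoopA ids need (sf + idx.toNat) (sf + idx.toNat + 1) fuel

-- the final write loop: for i in range(start_labels, len(labels)): masked[i] = labels[i]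
-- (labels.getD i 0 is exact here: i < labels.length in every iteration)
def pvWriteA (labels : List Int) (i : Nat) (masked : List Int) : List Int :=
  if i < labels.length then pvWriteA labels (i + 1) (masked.set i (labels.getD i 0)) else masked
termination_by labels.length - i

def mask_labels_to_assistant_only (input_ids : List Int) (labels : List Int) (assistant_token_ids : List Int) : List Int :=
  let masked := List.replicate labels.length (-100)
  let start := pvLoopA input_ids assistant_token_ids (-1) 0 (input_ids.length + 1)
  if start = -1 then masked
  else pvWriteA labels (start.toNat + assistant_token_ids.length) masked

-- ===== PORT B =====
-- backward scan: i from n-m down to 0, first match found is the last occurrence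
def pvScanB (ids need : List Int) (i : Nat) : Int :=
  if (ids.drop i).take need.length = need then (i : Int)
  else if _h : i = 0 then -1 else pvScanB ids need (i - 1)
termination_by i

def mask_labels_to_assistant_only_alt (input_ids : List Int) (labels : List Int) (assistant_token_ids : List Int) : List Int :=
  let start :=
    if assistant_token_ids.length ≤ input_ids.length then
      pvScanB input_ids assistant_token_ids (input_ids.length - assistant_token_ids.length)
    else -1
  if start = -1 then List.replicate labels.length (-100)
  else
    let cut := min (start.toNat + assistant_token_ids.length) labels.length
    List.replicate cut (-100) ++ labels.drop cut

-- ===== PRECONDITION & SPEC =====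
-- Pre_ excludes an empty assistant_token_ids, on which A never returns: its search
-- loop runs forever because find_subsequence of an empty needle always returns 0.
def Pre_mask_labels_to_assistant_only (input_ids : List Int) (labels : List Int) (assistant_token_ids : List Int) : Prop :=
  assistant_token_ids ≠ []
instance (input_ids : List Int) (labels : List Int) (assistant_token_ids : List Int) : Decidable (Pre_mask_labels_to_assistant_only input_ids labels assistant_token_ids) := by unfold Pre_mask_labels_to_assistant_only; infer_instance

def pvWitness_mask_labels_to_assistant_only : List Int × List Int × List Int :=
  ([5, 6, 1, 2], [10, 11, 12, 13], [5, 6])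

def Spec_mask_labels_to_assistant_only (input_ids : List Int) (labels : List Int) (assistant_token_ids : List Int) (out : List Int) : Prop := out = mask_labels_to_assistant_only_alt input_ids labels assistant_token_ids
instance (input_ids : List Int) (labels : List Int) (assistant_token_ids : List Int) (out : List Int) : Decidable (Spec_mask_labels_to_assistant_only input_ids labels assistant_token_ids out) := by unfold Spec_mask_labels_to_assistant_only; infer_instance

-- ===== CLAIM (what is proved, stated in full; the proofs are below) =====
def Claim_equal_mask_labels_to_assistant_only : Prop := ∀ (input_ids : List Int) (labels : List Int) (assistant_token_ids : List Int), Dom_mask_labels_to_assistant_only input_ids labels assistant_token_ids → Pre_mask_labels_to_assistant_only input_ids labels assistant_token_ids → Spec_mask_labels_to_assistant_only input_ids labels assistant_token_ids (mask_labels_to_assistant_only input_ids labels assistant_token_ids)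

-- ===== LEMMAS AND PROOFS =====

-- "the needle matches ids at position j"
def pvM (ids need : List Int) (j : Nat) : Prop := (ids.drop j).take need.length = need

-- a match fits inside the list (needs a nonempty needle)
lemma pvM_le {ids need : List Int} {j : Nat} (hm : 1 ≤ need.length) (h : pvM ids need j) :
    j + need.length ≤ ids.length := by
  unfold pvM at h
  have := congrArg List.length h
  simp [List.length_take, List.length_drop] at this
  omega

-- characterization of "the index of the last occurrence, or -1"
def pvChar (ids need : List Int) (r : Int) : Prop :=
  (r = -1 ∧ ∀ j, ¬ pvM ids need j) ∨
  (∃ k : Nat, r = (k : Int) ∧ pvM ids need k ∧ ∀ j, k < j → ¬ pvM ids need j)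

lemma pvChar_unique {ids need : List Int} {r r' : Int}
    (h : pvChar ids need r) (h' : pvChar ids need r') : r = r' := by
  rcases h with ⟨e, hn⟩ | ⟨k, e, hk, hlast⟩ <;>
    rcases h' with ⟨e', hn'⟩ | ⟨k', e', hk', hlast'⟩
  · omega
  · exact absurd hk' (hn k')
  · exact absurd hk (hn' k)
  · subst e e'
    rcases Nat.lt_trichotomy k k' with h | h | h
    · exact absurd hk' (hlast k' h)
    · omega
    · exact absurd hk (hlast' k h)

-- find_subsequence from i: returns the FIRST match ≥ i, or -1 if none
lemma pvFindSubAux_spec (hay need : List Int) (hm : 1 ≤ need.length) (i : Nat) :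
    (pvFindSubAux hay need i = -1 ∧ ∀ j, i ≤ j → ¬ pvM hay need j) ∨
    (∃ k : Nat, pvFindSubAux hay need i = (k : Int) ∧ i ≤ k ∧ pvM hay need k) := by
  unfold pvFindSubAux
  split
  · split
    · right; exact ⟨i, rfl, le_refl i, by assumption⟩
    · rcases pvFindSubAux_spec hay need hm (i + 1) with ⟨e, hn⟩ | ⟨k, e, hik, hk⟩
      · left
        refine ⟨e, fun j hij hMj => ?_⟩
        rcases Nat.eq_or_lt_of_le hij with rfl | hij'
        · exact absurd hMj (by assumption)
        · exact hn j hij' hMj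
      · right; exact ⟨k, e, by omega, hk⟩
  · left
    refine ⟨rfl, fun j hij hMj => ?_⟩
    have := pvM_le hm hMj
    omega
termination_by hay.length + 1 - i
decreasing_by omega

-- transfer: a match of the dropped list is a match of ids shifted by sf
lemma pvM_drop (ids need : List Int) (sf k : Nat) :
    pvM (ids.drop sf) need k ↔ pvM ids need (sf + k) := by
  unfold pvM
  rw [List.drop_drop]

-- the while loop computes the last occurrence
lemma pvLoopA_spec (ids need : List Int) (hm : 1 ≤ need.length) :
    ∀ (fuel : Nat) (start : Int) (sf : Nat),
      ids.length + 1 ≤ sf + fuel →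
      ((start = -1 ∧ ∀ j, j < sf → ¬ pvM ids need j) ∨
        (∃ k : Nat, start = (k : Int) ∧ pvM ids need k ∧ sf = k + 1)) →
      pvChar ids need (pvLoopA ids need start sf fuel) := by
  intro fuel
  induction fuel with
  | zero =>
    intro start sf hfuel hinv
    -- sf > ids.length: no match at or beyond sf is possible
    have hno : ∀ j, sf ≤ j → ¬ pvM ids need j := by
      intro j hj hMj
      have := pvM_le hm hMj
      omega
    rcases hinv with ⟨e, hn⟩ | ⟨k, e, hk, hsf⟩
    · exact Or.inl ⟨e, fun j => by
        by_cases h : j < sf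
        · exact hn j h
        · exact hno j (by omega)⟩
    · exact Or.inr ⟨k, e, hk, fun j hkj => hno j (by omega)⟩
  | succ fuel ih =>
    intro start sf hfuel hinv
    show pvChar ids need (pvLoopA ids need start sf (fuel + 1))
    rw [pvLoopA]
    rcases pvFindSubAux_spec (ids.drop sf) need hm 0 with ⟨e, hn⟩ | ⟨k, e, _, hk⟩
    · -- no further match: start is the answer
      simp only [pvFindSubsequence, e, reduceIte]

      have hnodrop : ∀ j, sf ≤ j → ¬ pvM ids need j := by
        intro j hj hMj
        have : pvM (ids.drop sf) need (j - sf) := by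
          rw [pvM_drop]; rwa [Nat.add_sub_cancel' hj]
        exact hn (j - sf) (Nat.zero_le _) this
      rcases hinv with ⟨e', hless⟩ | ⟨k, e', hk, hsf⟩
      · exact Or.inl ⟨e', fun j => by
          by_cases h : j < sf
          · exact hless j h
          · exact hnodrop j (by omega)⟩
      · exact Or.inr ⟨k, e', hk, fun j hkj => hnodrop j (by omega)⟩
    · -- match at sf + k: continue with new start
      have hne : ((k : Int)) ≠ -1 := by omega
      simp only [pvFindSubsequence, e, if_neg hne, Int.toNat_natCast]
      have hMk : pvM ids need (sf + k) := (pvM_drop ids need sf k).mp hk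
      have hbound : sf + k + need.length ≤ ids.length := pvM_le hm hMk
      apply ih
      · omega
      · exact Or.inr ⟨sf + k, by omega, hMk, rfl⟩

-- the backward scan computes the last occurrence
lemma pvScanB_spec (ids need : List Int) (_hm : 1 ≤ need.length) :
    ∀ i : Nat, (∀ j, i < j → ¬ pvM ids need j) →
      pvChar ids need (pvScanB ids need i) := by
  intro i
  induction i using Nat.strong_induction_on with
  | _ i ih =>
    intro habove
    rw [pvScanB]
    split
    · exact Or.inr ⟨i, rfl, by assumption, habove⟩
    · split
      · subst ‹i = 0›
        refine Or.inl ⟨rfl, fun j => ?_⟩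
        match j with
        | 0 => assumption
        | j + 1 => exact habove (j + 1) (by omega)
      · apply ih (i - 1) (by omega)
        intro j hj
        by_cases h : j = i
        · subst h; assumption
        · exact habove j (by omega)

lemma pvScanB_top (ids need : List Int) (hm : 1 ≤ need.length) :
    pvChar ids need
      (if need.length ≤ ids.length then pvScanB ids need (ids.length - need.length) else -1) := by
  split
  · apply pvScanB_spec ids need hm
    intro j hj hMj
    have := pvM_le hm hMj
    omega
  · refine Or.inl ⟨rfl, fun j hMj => ?_⟩
    have := pvM_le hm hMj
    omega

-- the write loop fills the tail of masked with labels
lemma pvWriteA_eq (labels : List Int) (i : Nat) (masked : List Int)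
    (hlen : masked.length = labels.length) :
    pvWriteA labels i masked = masked.take i ++ labels.drop i := by
  rw [pvWriteA]
  split
  · rename_i hlt
    rw [pvWriteA_eq labels (i + 1) _ (by simp [hlen])]
    have hmi : i < masked.length := by rw [hlen]; exact hlt
    have h1 : (masked.set i (labels.getD i 0)).take (i + 1)
        = masked.take i ++ [labels.getD i 0] := by
      rw [List.take_add_one, List.getElem?_set_self hmi, List.take_set,
          List.set_eq_of_length_le (by simp)]
      simp
    have h2 : labels.drop i = labels.getD i 0 :: labels.drop (i + 1) := by
      rw [List.getD_eq_getElem _ _ hlt, List.drop_eq_getElem_cons hlt]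
    rw [h1, h2]
    simp
  · rename_i hge
    rw [List.take_of_length_le (by omega), List.drop_of_length_le (by omega), List.append_nil]
termination_by labels.length - i
decreasing_by omega

-- ===== VERDICT (by name: the statement is the Claim_ definition above) =====
theorem mask_labels_to_assistant_only_spec : Claim_equal_mask_labels_to_assistant_only := by
  intro input_ids labels assistant_token_ids _ hpre
  unfold Spec_mask_labels_to_assistant_only
  unfold mask_labels_to_assistant_only mask_labels_to_assistant_only_alt
  have hm : 1 ≤ assistant_token_ids.length := by
    cases assistant_token_ids with
    | nil => exact absurd rfl hpre
    | cons a t => simp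
  have hA : pvChar input_ids assistant_token_ids
      (pvLoopA input_ids assistant_token_ids (-1) 0 (input_ids.length + 1)) :=
    pvLoopA_spec input_ids assistant_token_ids hm (input_ids.length + 1) (-1) 0 (by omega)
      (Or.inl ⟨rfl, by omega⟩)
  have hB : pvChar input_ids assistant_token_ids
      (if assistant_token_ids.length ≤ input_ids.length then
        pvScanB input_ids assistant_token_ids (input_ids.length - assistant_token_ids.length)
      else -1) := pvScanB_top input_ids assistant_token_ids hm
  have hs : pvLoopA input_ids assistant_token_ids (-1) 0 (input_ids.length + 1)
      = (if assistant_token_ids.length ≤ input_ids.length then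
          pvScanB input_ids assistant_token_ids (input_ids.length - assistant_token_ids.length)
        else -1) := pvChar_unique hA hB
  rw [hs]
  set s := (if assistant_token_ids.length ≤ input_ids.length then
      pvScanB input_ids assistant_token_ids (input_ids.length - assistant_token_ids.length)
    else -1) with hsdef
  by_cases hneg : s = -1
  · simp [hneg]
  · simp only [if_neg hneg]
    rw [pvWriteA_eq labels (s.toNat + assistant_token_ids.length)
        (List.replicate labels.length (-100)) (by simp)]
    rw [List.take_replicate]
    have hdrop : labels.drop (s.toNat + assistant_token_ids.length)
        = labels.drop (min (s.toNat + assistant_token_ids.length) labels.length) := by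
      by_cases h : s.toNat + assistant_token_ids.length ≤ labels.length
      · rw [Nat.min_eq_left h]
      · rw [List.drop_of_length_le (by omega), List.drop_of_length_le (by omega)]
    rw [hdrop]
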